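-- pv_equiv track=rewrite | github.com/ilgo/biology | bioinformatics_1/bio6.py | breakpoint_count
-- ===== SOURCE A (Python) =====
-- def breakpoint_count(signed_perm):
--     '''
--     counts the breakpoints in the signed permutation
--
--     returns the count
--
--     :param signed_perm: a permutation of n signed integers
--     :type signed_perm: [`int`, ...]
--
--     :rtype: `int`
--     '''
--     c = 0
--     if signed_perm[0] != 1:
--         c += 1
--     if signed_perm[-1] != len(signed_perm):
--         c += 1
--     for n,m  in zip(signed_perm[:-1], signed_perm[1:]):
--         if n+1 != m:
--             c += 1
--     return c
-- ===== SOURCE B (Python) =====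
-- def breakpoint_count(signed_perm):
--     # strip decomposition: walk the sentinel-extended sequence strip by strip
--     # (a strip = maximal run of consecutive values); breakpoints = strips - 1
--     n = len(signed_perm)
--
--     def val(i):
--         if i == -1:
--             return 0
--         if i == n:
--             return n + 1
--         return signed_perm[i]
--
--     strips = 0
--     i = -1
--     while i <= n:
--         strips += 1
--         while i < n and val(i + 1) == val(i) + 1:
--             i += 1
--         i += 1
--     return strips - 1
-- ===== Notes on version B (the rewrite author's own statement) =====
-- stated objective: alternative
-- what changed: B uses the strip decomposition from genome-rearrangement theory: a nested while loop walks the sentinel-extended sequence strip by strip (skipping each maximal run of consecutive values), counts the strips, and returns strips - 1, instead of A's flat pair scan with two special boundary checks.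
-- crash fix: On the empty list A raises IndexError (signed_perm[0]); B returns 0, the breakpoint count of the empty permutation. — e.g. on breakpoint_count([]): A raises IndexError, B returns 0
import Mathlib
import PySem

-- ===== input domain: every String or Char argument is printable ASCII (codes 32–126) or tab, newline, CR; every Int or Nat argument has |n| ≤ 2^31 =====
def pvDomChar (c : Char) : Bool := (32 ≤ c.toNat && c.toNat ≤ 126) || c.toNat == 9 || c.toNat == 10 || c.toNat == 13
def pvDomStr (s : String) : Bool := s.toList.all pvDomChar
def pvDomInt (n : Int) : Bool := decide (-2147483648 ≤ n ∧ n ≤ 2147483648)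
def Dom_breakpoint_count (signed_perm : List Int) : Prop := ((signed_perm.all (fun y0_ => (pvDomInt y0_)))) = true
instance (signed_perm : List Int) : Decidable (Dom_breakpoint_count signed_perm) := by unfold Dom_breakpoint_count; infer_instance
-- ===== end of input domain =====

-- B replaces A's flat pair scan with boundary special cases by the strip decomposition:
-- a nested while loop skips maximal runs of consecutive values and returns (number of strips) - 1.

-- ===== PORT A =====
def breakpoint_count (signed_perm : List Int) : Int :=
  let c : Int := 0
  let c := if PySem.List.pyGetD signed_perm 0 0 ≠ 1 then c + 1 else c
  let c := if PySem.List.pyGetD signed_perm (-1) 0 ≠ PySem.List.len signed_perm then c + 1 else c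
  ((PySem.List.slice signed_perm none (some (-1))).zip
      (PySem.List.slice signed_perm (some 1) none)).foldl
    (fun c p => if p.1 + 1 ≠ p.2 then c + 1 else c) c

-- ===== PORT B =====
/-- B's helper `val(i)`: the sentinel-extended value at position i, -1 ≤ i ≤ n.
    B only ever calls it with -1 ≤ i ≤ n, so the list access is always in range
    and `pyGetD` with a default is exact. -/
def bcVal (sp : List Int) (n i : Int) : Int :=
  if i = -1 then 0 else if i = n then n + 1 else PySem.List.pyGetD sp i 0

/-- B's inner while loop: advance i across the current maximal run, return the final i. -/
def bcInner (sp : List Int) (n i : Int) : Int :=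
  if h : i < n ∧ bcVal sp n (i + 1) = bcVal sp n i + 1 then bcInner sp n (i + 1) else i
termination_by (n - i).toNat
decreasing_by omega

theorem bcInner_ge (sp : List Int) (n i : Int) : i ≤ bcInner sp n i := by
  fun_induction bcInner with
  | case1 i h ih => omega
  | case2 i h => omega

/-- B's outer while loop: one iteration per strip. -/
def bcOuter (sp : List Int) (n i strips : Int) : Int :=
  if h : i ≤ n then bcOuter sp n (bcInner sp n i + 1) (strips + 1) else strips
termination_by (n + 1 - i).toNat
decreasing_by have := bcInner_ge sp n i; omega

def breakpoint_count_alt (signed_perm : List Int) : Int :=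
  let n := PySem.List.len signed_perm
  bcOuter signed_perm n (-1) 0 - 1

-- ===== PRECONDITION & SPEC =====
-- Pre_ excludes exactly the empty list, on which A raises IndexError (signed_perm[0]).
def Pre_breakpoint_count (signed_perm : List Int) : Prop := signed_perm ≠ []
instance (signed_perm : List Int) : Decidable (Pre_breakpoint_count signed_perm) := by
  unfold Pre_breakpoint_count; infer_instance
def pvWitness_breakpoint_count : List Int := [1]

-- On the empty list A raises IndexError (signed_perm[0]); B returns 0, the breakpoint count of the empty permutation.
def Raises_breakpoint_count (signed_perm : List Int) : Prop := signed_perm = []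
instance (signed_perm : List Int) : Decidable (Raises_breakpoint_count signed_perm) := by
  unfold Raises_breakpoint_count; infer_instance
def pvRaiseWitness_breakpoint_count : List Int := []
def pvRaiseWitnessOut_breakpoint_count : Int := 0

def Spec_breakpoint_count (signed_perm : List Int) (out : Int) : Prop := out = breakpoint_count_alt signed_perm
instance (signed_perm : List Int) (out : Int) : Decidable (Spec_breakpoint_count signed_perm out) := by unfold Spec_breakpoint_count; infer_instance

-- ===== CLAIM =====
def Claim_equal_breakpoint_count : Prop := ∀ (signed_perm : List Int), Dom_breakpoint_count signed_perm → Pre_breakpoint_count signed_perm → Spec_breakpoint_count signed_perm (breakpoint_count signed_perm)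
def Claim_raises_breakpoint_count : Prop := (∀ (signed_perm : List Int), Dom_breakpoint_count signed_perm → Raises_breakpoint_count signed_perm → ¬ Pre_breakpoint_count signed_perm) ∧ (Dom_breakpoint_count (pvRaiseWitness_breakpoint_count) ∧ Raises_breakpoint_count (pvRaiseWitness_breakpoint_count) ∧ breakpoint_count_alt (pvRaiseWitness_breakpoint_count) = pvRaiseWitnessOut_breakpoint_count)

-- ===== LEMMAS AND PROOFS =====

/-- Adjacent-pair breakpoint count of a list relative to a previous element. -/
def pairSum (a : Int) : List Int → Int
  | [] => 0
  | b :: bs => (if b - a ≠ 1 then 1 else 0) + pairSum b bs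

/-- Breakpoints among the extended pairs (j, j+1) for i ≤ j < n (index form). -/
def bp (sp : List Int) (n i : Int) : Int :=
  if _h : i < n then
    (if bcVal sp n (i + 1) ≠ bcVal sp n i + 1 then 1 else 0) + bp sp n (i + 1)
  else 0
termination_by (n - i).toNat
decreasing_by omega

theorem bcInner_le (sp : List Int) (n i : Int) (h : i ≤ n) : bcInner sp n i ≤ n := by
  fun_induction bcInner with
  | case1 i h' ih => exact ih (by omega)
  | case2 i h' => omega

theorem bcInner_stop (sp : List Int) (n i : Int) :
    ¬ (bcInner sp n i < n ∧
        bcVal sp n (bcInner sp n i + 1) = bcVal sp n (bcInner sp n i) + 1) := by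
  fun_induction bcInner with
  | case1 i h ih => exact ih
  | case2 i h => exact h

theorem bp_bcInner (sp : List Int) (n i : Int) : bp sp n (bcInner sp n i) = bp sp n i := by
  fun_induction bcInner with
  | case1 i h ih =>
    rw [ih]
    conv_rhs => rw [bp]
    rw [dif_pos h.1, if_neg (by simpa using h.2)]
    omega
  | case2 i h => rfl

theorem bcOuter_eq (sp : List Int) (n : Int) :
    ∀ k (i strips : Int), (n + 1 - i).toNat ≤ k → i ≤ n →
      bcOuter sp n i strips = strips + 1 + bp sp n i := by
  intro k
  induction k with
  | zero => intro i strips hk hi; omega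
  | succ k ih =>
    intro i strips hk hi
    rw [bcOuter, dif_pos hi]
    have hge := bcInner_ge sp n i
    have hle := bcInner_le sp n i hi
    have hstop := bcInner_stop sp n i
    set j := bcInner sp n i with hj
    by_cases hjn : j < n
    · -- pair (j, j+1) is a breakpoint; recurse into the next strip
      rw [ih (j + 1) (strips + 1) (by omega) (by omega)]
      have : bp sp n j = 1 + bp sp n (j + 1) := by
        rw [bp, dif_pos hjn, if_pos (by tauto)]
      rw [← bp_bcInner sp n i, ← hj, this]
      ring
    · -- j = n: last strip ends at the final sentinel
      have hjeq : j = n := by omega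
      rw [bcOuter, dif_neg (by omega)]
      rw [← bp_bcInner sp n i, ← hj, hjeq, bp, dif_neg (by omega)]
      ring

theorem bp_eq_pairSum (sp : List Int) (n : Int) (hn : n = (sp.length : Int)) :
    ∀ k (i : Int), (n - i).toNat ≤ k → -1 ≤ i → i ≤ n →
      bp sp n i = pairSum (bcVal sp n i) ((0 :: sp ++ [n + 1]).drop (i + 2).toNat) := by
  intro k
  induction k with
  | zero =>
    intro i hk h1 h2
    have hieq : i = n := by omega
    rw [bp, dif_neg (by omega)]
    have : ((i + 2).toNat) = sp.length + 2 := by omega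
    simp [this, List.drop_eq_nil_of_le, pairSum]
  | succ k ih =>
    intro i hk h1 h2
    by_cases hin : i < n
    · rw [bp, dif_pos hin]
      have hidx : (i + 2).toNat < (0 :: sp ++ [n + 1]).length := by
        simp; omega
      rw [List.drop_eq_getElem_cons hidx]
      have hget : (0 :: sp ++ [n + 1])[(i + 2).toNat] = bcVal sp n (i + 1) := by
        unfold bcVal
        rcases lt_or_ge (i + 1) n with hlt | hge
        · rw [if_neg (by omega), if_neg (by omega)]
          have hnat : (i + 2).toNat = (i + 1).toNat + 1 := by omega
          simp only [hnat, List.cons_append, List.getElem_cons_succ]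
          rw [List.getElem_append_left (by omega)]
          rw [PySem.List.pyGetD_eq_getElem sp 0 (by omega) (by omega)]
        · have hieq : i + 1 = n := by omega
          rw [if_neg (by omega), if_pos hieq]
          have hnat : (i + 2).toNat = sp.length + 1 := by omega
          simp only [hnat, List.cons_append, List.getElem_cons_succ]
          rw [List.getElem_append_right (le_refl _)]
          simp
      rw [hget, ih (i + 1) (by omega) (by omega) (by omega)]
      have hdrop : (i + 1 + 2).toNat = (i + 2).toNat + 1 := by omega
      rw [hdrop, pairSum]
      split_ifs <;> omega
    · rw [bp, dif_neg hin]
      have : ((i + 2).toNat) = sp.length + 2 := by omega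
      simp [this, List.drop_eq_nil_of_le, pairSum]

theorem alt_eq_pairSum (sp : List Int) :
    breakpoint_count_alt sp = pairSum 0 (sp ++ [(sp.length : Int) + 1]) := by
  unfold breakpoint_count_alt
  simp only [PySem.List.len_eq]
  rw [bcOuter_eq sp (sp.length : Int) ((sp.length : Int) + 2).toNat (-1) 0 (by omega) (by omega)]
  rw [bp_eq_pairSum sp (sp.length : Int) rfl ((sp.length : Int) + 1).toNat (-1) (by omega)
    (by omega) (by omega)]
  have : ((-1 : Int) + 2).toNat = 1 := by omega
  rw [this]
  simp [bcVal]

theorem pairSum_append_last (t : Int) (l : List Int) (a : Int) :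
    pairSum a (l ++ [t]) = pairSum a l
      + (if t - (a :: l).getLast (by simp) ≠ 1 then 1 else 0) := by
  induction l generalizing a with
  | nil => simp [pairSum]
  | cons b bs ih =>
    simp only [List.cons_append, pairSum, ih b, List.getLast_cons (by simp : b :: bs ≠ [])]
    ring

theorem foldA (xs : List Int) (x : Int) (c : Int) :
    (((x :: xs).dropLast.zip xs).foldl
        (fun c p => if p.1 + 1 ≠ p.2 then c + 1 else c) c)
      = c + pairSum x xs := by
  induction xs generalizing x c with
  | nil => simp [pairSum]
  | cons b bs ih =>
    simp only [List.dropLast_cons₂, List.zip_cons_cons, List.foldl_cons, pairSum, ih b]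
    by_cases h : x + 1 ≠ b
    · rw [if_pos h, if_pos (by omega)]; ring
    · rw [if_neg h, if_neg (by omega)]; ring

-- ===== VERDICT =====
theorem breakpoint_count_spec : Claim_equal_breakpoint_count := by
  intro sp _ hpre
  match sp, hpre with
  | x :: xs, _ =>
    show breakpoint_count (x :: xs) = breakpoint_count_alt (x :: xs)
    have hne : x :: xs ≠ [] := by simp
    rw [alt_eq_pairSum]
    unfold breakpoint_count
    simp only [PySem.List.slice_to_neg_one, PySem.List.slice_from_one,
      PySem.List.pyGetD_zero_cons, PySem.List.pyGetD_neg_one _ _ hne,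
      PySem.List.len_eq, List.cons_append, List.tail_cons]
    rw [foldA]
    simp only [pairSum, pairSum_append_last]
    generalize pairSum x xs = P
    have hlen : (((x :: xs).length : Int)) = (xs.length : Int) + 1 := by simp
    generalize hg : (x :: xs).getLast hne = L at *
    rw [hlen]
    split_ifs <;> omega
theorem breakpoint_count_raises : Claim_raises_breakpoint_count := by
  unfold Claim_raises_breakpoint_count
  refine ⟨fun sp _ hr => by simp [Raises_breakpoint_count] at hr; simp [Pre_breakpoint_count, hr],
    by decide, by decide, ?_⟩
  rw [alt_eq_pairSum]
  simp [pvRaiseWitness_breakpoint_count, pvRaiseWitnessOut_breakpoint_count, pairSum]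

theorem breakpoint_count_raises_witness_ok :
    breakpoint_count_alt pvRaiseWitness_breakpoint_count = pvRaiseWitnessOut_breakpoint_count := by
  have h := breakpoint_count_raises
  unfold Claim_raises_breakpoint_count at h
  exact h.2.2.2
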